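-- pv_equiv track=rewrite | github.com/fesflabs/new_suap | edu/management/commands/edu_corrigir_matriculas_periodo.py | get_periodos
-- ===== SOURCE A (Python) =====
-- def get_periodos(ano_atual, ultimo_ano, ultimo_periodo=None):
--     lista = []
--     if ultimo_periodo:
--         if ultimo_periodo == 1:
--             lista.append((ultimo_ano, 2))
--         for ano in range(ultimo_ano + 1, ano_atual + 1):
--             lista.append((ano, 1))
--             lista.append((ano, 2))
--     else:
--         for ano in range(ultimo_ano + 1, ano_atual + 1):
--             lista.append((ano, 1))
--     return lista
-- ===== SOURCE B (Python) =====
-- def get_periodos(ano_atual, ultimo_ano, ultimo_periodo=None):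
--     # Walk DOWN from ano_atual to ultimo_ano, collecting each year's periods in
--     # reverse, then reverse once; finally prepend the leftover (ultimo_ano, 2)
--     # if a second period is still pending.
--     rev = []
--     ano = ano_atual
--     while ano > ultimo_ano:
--         if ultimo_periodo:
--             rev.append((ano, 2))
--         rev.append((ano, 1))
--         ano -= 1
--     lista = rev[::-1]
--     if ultimo_periodo == 1:
--         lista = [(ultimo_ano, 2)] + lista
--     return lista
-- ===== Notes on version B (the rewrite author's own statement) =====
-- stated objective: alternative
-- what changed: Replaces A's forward foldl over range(ultimo_ano+1, ano_atual+1) with per-branch appends by a backwards countdown loop from ano_atual that collects the periods in reverse and reverses once, prepending the leftover (ultimo_ano, 2) at the end.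
import Mathlib
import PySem

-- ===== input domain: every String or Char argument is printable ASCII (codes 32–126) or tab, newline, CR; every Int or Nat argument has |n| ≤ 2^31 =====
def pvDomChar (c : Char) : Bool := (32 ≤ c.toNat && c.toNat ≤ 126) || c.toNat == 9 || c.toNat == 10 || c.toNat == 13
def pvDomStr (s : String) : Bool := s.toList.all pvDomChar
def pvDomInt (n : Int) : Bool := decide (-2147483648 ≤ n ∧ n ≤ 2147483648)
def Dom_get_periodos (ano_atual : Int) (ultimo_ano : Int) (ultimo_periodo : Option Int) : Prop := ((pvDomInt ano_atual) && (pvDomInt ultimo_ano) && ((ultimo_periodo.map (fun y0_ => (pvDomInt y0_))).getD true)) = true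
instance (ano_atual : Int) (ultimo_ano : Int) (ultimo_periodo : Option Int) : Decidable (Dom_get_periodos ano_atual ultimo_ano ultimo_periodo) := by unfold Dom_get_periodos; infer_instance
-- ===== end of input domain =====

-- B replaces A's forward append loop with a backwards countdown loop collecting periods in reverse plus one final reverse; alternative decomposition, same cost.


-- ===== PORT A =====
def get_periodos (ano_atual : Int) (ultimo_ano : Int) (ultimo_periodo : Option Int) : List (Int × Int) :=
  let lista : List (Int × Int) := []
  if (match ultimo_periodo with | none => false | some p => p != 0) then
    let lista := if ultimo_periodo == some 1 then lista ++ [(ultimo_ano, 2)] else lista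
    (PySem.List.pyRange (ultimo_ano + 1) (ano_atual + 1) 1).foldl
      (fun l ano => (l ++ [(ano, 1)]) ++ [(ano, 2)]) lista
  else
    (PySem.List.pyRange (ultimo_ano + 1) (ano_atual + 1) 1).foldl
      (fun l ano => l ++ [(ano, 1)]) lista

-- ===== PORT B =====
-- B's while loop: countdown from ano_atual, appending each year's periods in reverse order.
def get_periodos_loop (ultimo_ano : Int) (two : Bool) (ano : Int) (rev : List (Int × Int)) : List (Int × Int) :=
  if ano ≤ ultimo_ano then rev
  else get_periodos_loop ultimo_ano two (ano - 1)
    ((if two then rev ++ [(ano, 2)] else rev) ++ [(ano, 1)])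
termination_by (ano - ultimo_ano).toNat
decreasing_by omega

def get_periodos_alt (ano_atual : Int) (ultimo_ano : Int) (ultimo_periodo : Option Int) : List (Int × Int) :=
  let two := match ultimo_periodo with | none => false | some p => p != 0
  let lista := (get_periodos_loop ultimo_ano two ano_atual []).reverse
  if ultimo_periodo == some 1 then (ultimo_ano, 2) :: lista else lista

-- ===== PRECONDITION & SPEC =====
def Spec_get_periodos (ano_atual : Int) (ultimo_ano : Int) (ultimo_periodo : Option Int) (out : List (Int × Int)) : Prop := out = get_periodos_alt ano_atual ultimo_ano ultimo_periodo
instance (ano_atual : Int) (ultimo_ano : Int) (ultimo_periodo : Option Int) (out : List (Int × Int)) : Decidable (Spec_get_periodos ano_atual ultimo_ano ultimo_periodo out) := by unfold Spec_get_periodos; infer_instance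

-- ===== CLAIM =====
def Claim_equal_get_periodos : Prop := ∀ (ano_atual : Int) (ultimo_ano : Int) (ultimo_periodo : Option Int), Dom_get_periodos ano_atual ultimo_ano ultimo_periodo → Spec_get_periodos ano_atual ultimo_ano ultimo_periodo (get_periodos ano_atual ultimo_ano ultimo_periodo)

-- ===== LEMMAS AND PROOFS =====

-- flatMap of singleton blocks is a map (used for the falsy branch).
theorem flatMap_single (l : List Int) :
    l.flatMap (fun y => [((y : Int), (1 : Int))]) = l.map (fun y => (y, 1)) := by
  induction l with
  | nil => rfl
  | cons x xs ih => simp [List.flatMap_cons, ih]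

-- B's countdown appends exactly the reversed flatMap of the per-year blocks.
theorem loop_eq_flatMap (u : Int) (two : Bool) :
    ∀ (n : Nat) (ano : Int), (ano - u).toNat = n → ∀ (rev : List (Int × Int)),
      get_periodos_loop u two ano rev
        = rev ++ ((PySem.List.pyRange (u + 1) (ano + 1) 1).flatMap
            (fun y => if two then [(y, 1), (y, 2)] else [(y, 1)])).reverse := by
  intro n
  induction n with
  | zero =>
    intro ano h rev
    rw [get_periodos_loop, if_pos (by omega : ano ≤ u),
        PySem.List.pyRange_one_eq_nil (by omega : ano + 1 ≤ u + 1)]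
    simp
  | succ k ih =>
    intro ano h rev
    rw [get_periodos_loop, if_neg (by omega : ¬ ano ≤ u)]
    rw [ih (ano - 1) (by omega)]
    rw [PySem.List.pyRange_one_succ_right (by omega : u + 1 ≤ ano)]
    have : ano - 1 + 1 = ano := by ring
    rw [this]
    cases two <;> simp

theorem get_periodos_spec : Claim_equal_get_periodos := by
  intro a u p _
  unfold Spec_get_periodos
  simp only [get_periodos, get_periodos_alt]
  rw [loop_eq_flatMap u _ (a - u).toNat a rfl]
  simp only [List.nil_append, List.reverse_reverse]
  match p with
  | none =>
    simp only [List.append_nil]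
    rw [PySem.List.foldl_append_singleton_eq_map, ← flatMap_single]
    simp
  | some v =>
    by_cases hv0 : v = 0
    · subst hv0
      simp only [show ((0 : Int) != 0) = false from rfl, List.append_nil,
        show (some (0 : Int) == some 1) = false from rfl]
      rw [PySem.List.foldl_append_singleton_eq_map, ← flatMap_single]
      simp
    · have hne : (v != 0) = true := by simp [hv0]
      simp only [hne, if_true, List.append_nil]
      have hfold : ∀ (init : List (Int × Int)),
          (PySem.List.pyRange (u + 1) (a + 1) 1).foldl
            (fun l ano => (l ++ [(ano, 1)]) ++ [(ano, 2)]) init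
          = init ++ (PySem.List.pyRange (u + 1) (a + 1) 1).flatMap
              (fun y => [(y, 1), (y, 2)]) := by
        intro init
        have := PySem.List.foldl_append_eq_flatMap
          (fun (y : Int) => [((y : Int), (1 : Int)), (y, 2)])
          (PySem.List.pyRange (u + 1) (a + 1) 1) init
        simpa [List.append_assoc] using this
      by_cases hv1 : v = 1
      · subst hv1
        simp only [beq_self_eq_true, if_true, List.nil_append, hfold]
        simp
      · have hne1 : (some v == some 1) = false := by simp [hv1]
        simp only [hne1, hfold]
        simp
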